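-- pv_equiv track=rewrite | github.com/Anya9889/PythonInterviewPrep | python_algorithms.py | unique_2
-- ===== SOURCE A (Python) =====
-- def unique_2(s):
--
--     s = s.replace(' ', '')
--     characters = set()
--
--     for letter in s:
--         if letter in characters:
--             return False
--         else:
--             characters.add(letter)
--
--     return True
-- ===== SOURCE B (Python) =====
-- def unique_2(s):
--     s = s.replace(' ', '')
--     return len(set(s)) == len(s)
-- ===== Notes on version B (the rewrite author's own statement) =====
-- stated objective: simpler
-- what changed: Replaces the incremental scan with a membership test and early return by building the full character set once and comparing its size to the string length; the loop, branch and early exit disappear.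
import Mathlib
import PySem

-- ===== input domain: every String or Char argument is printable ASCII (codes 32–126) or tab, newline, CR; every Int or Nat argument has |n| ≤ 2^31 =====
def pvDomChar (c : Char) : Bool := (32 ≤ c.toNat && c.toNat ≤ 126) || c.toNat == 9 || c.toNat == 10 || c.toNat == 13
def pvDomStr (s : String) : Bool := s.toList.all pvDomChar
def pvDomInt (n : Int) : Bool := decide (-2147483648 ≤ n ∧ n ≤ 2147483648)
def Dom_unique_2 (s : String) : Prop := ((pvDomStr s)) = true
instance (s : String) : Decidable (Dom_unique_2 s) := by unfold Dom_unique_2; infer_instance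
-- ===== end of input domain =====

-- B replaces A's scan-with-membership-test-and-early-return by building the whole
-- character set once and comparing its size to the string length (objective: simpler).


-- ===== PORT A =====
-- the for-loop with early 'return False', as structural recursion over the chars with the set as state
def unique2Loop (l : List Char) (characters : PySem.Set Char) : Bool :=
  match l with
  | [] => true
  | letter :: rest =>
      if PySem.Set.contains characters letter then false
      else unique2Loop rest (PySem.Set.add characters letter)

def unique_2 (s : String) : Bool :=
  let s' := PySem.Str.replace s " " ""
  unique2Loop s'.toList PySem.Set.empty

-- ===== PORT B =====
def unique_2_alt (s : String) : Bool :=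
  let s' := PySem.Str.replace s " " ""
  PySem.Set.len (PySem.Set.ofList s'.toList) == PySem.Str.len s'

-- ===== PRECONDITION & SPEC =====
def Spec_unique_2 (s : String) (out : Bool) : Prop := out = unique_2_alt s
instance (s : String) (out : Bool) : Decidable (Spec_unique_2 s out) := by unfold Spec_unique_2; infer_instance

-- ===== CLAIM (what is proved, stated in full; the proofs are below) =====
def Claim_equal_unique_2 : Prop := ∀ (s : String), Dom_unique_2 s → Spec_unique_2 s (unique_2 s)

-- ===== LEMMAS AND PROOFS =====

theorem unique2Loop_iff (l : List Char) (seen : PySem.Set Char) :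
    unique2Loop l seen = true ↔ l.Nodup ∧ ∀ c ∈ l, c ∉ seen := by
  induction l generalizing seen with
  | nil => simp [unique2Loop]
  | cons c rest ih =>
      simp only [unique2Loop, PySem.Set.contains_eq_listContains, List.contains_eq_mem]
      by_cases h : c ∈ seen
      · simp only [h, decide_true, if_true, List.nodup_cons]
        constructor
        · intro hfalse; exact absurd hfalse (by simp)
        · rintro ⟨_, hall⟩
          exact absurd h (hall c (List.mem_cons_self ..))
      · simp only [h, decide_false, Bool.false_eq_true, if_false, ih, List.nodup_cons, List.mem_cons]
        constructor
        · rintro ⟨hnd, hall⟩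
          refine ⟨⟨fun hcr => ?_, hnd⟩, ?_⟩
          · exact absurd ((PySem.Set.mem_add _ _ _).mpr (Or.inr rfl)) (hall c hcr)
          · rintro x (rfl | hx)
            · exact h
            · intro hxs
              exact hall x hx ((PySem.Set.mem_add _ _ _).mpr (Or.inl hxs))
        · rintro ⟨⟨hcr, hnd⟩, hall⟩
          refine ⟨hnd, fun x hx hxa => ?_⟩
          rcases (PySem.Set.mem_add _ _ _).mp hxa with hxs | rfl
          · exact hall x (Or.inr hx) hxs
          · exact hcr hx

theorem len_iff (l : List Char) :
    (((PySem.Set.len (PySem.Set.ofList l) : Int) == (l.length : Int)) = true) ↔ l.Nodup := by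
  have hperm : (PySem.List.dedup l).Perm l.dedup := by
    apply (List.perm_ext_iff_of_nodup (PySem.List.nodup_dedup l) l.nodup_dedup).mpr
    intro x
    rw [PySem.List.mem_dedup, List.mem_dedup]
  have hlen : PySem.Set.len (PySem.Set.ofList l) = l.dedup.length := by
    rw [PySem.Set.len, ← PySem.List.dedup_eq_ofList, hperm.length_eq]
  rw [hlen, beq_iff_eq, Int.natCast_inj]
  constructor
  · intro heq
    exact List.dedup_eq_self.mp ((List.dedup_sublist l).eq_of_length heq)
  · intro h
    rw [List.dedup_eq_self.mpr h]

-- ===== VERDICT (by name: the statement is the Claim_ definition above) =====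
theorem unique_2_spec : Claim_equal_unique_2 := by
  intro s _
  show unique_2 s = unique_2_alt s
  unfold unique_2 unique_2_alt
  apply Bool.eq_iff_iff.mpr
  rw [unique2Loop_iff]
  have hlen : PySem.Str.len (PySem.Str.replace s " " "") =
      ((PySem.Str.replace s " " "").toList.length : Int) := by
    simp [PySem.Str.len_eq]
  show _ ↔ (((PySem.Set.ofList (PySem.Str.replace s " " "").toList).len : Int) == PySem.Str.len (PySem.Str.replace s " " "")) = true
  rw [hlen, len_iff]
  simp [PySem.Set.empty]
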